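-- pv_equiv track=rewrite | github.com/Kodsport/kth-challenge-2020 | aijeopardy/submissions/accepted/per.py | solve
-- ===== SOURCE A (Python) =====
-- def binom(n, k):
--     r = 1
--     for i in range(k): r = r*(n-i)//(i+1)
--     return r
--
-- def solve(C):
--     if C == 1: return (0, 0)
--     for k in range(200, 0, -1):
--         lo = 2*k-1
--         hi = 2*lo
--         while binom(hi, k) < C:
--             lo = hi
--             hi = 2*lo
--         while hi - lo > 1:
--             n = (lo+hi)//2
--             nCk = binom(n, k)
--             if nCk == C: return (n, k)
--             elif nCk < C: lo = n
--             else: hi = n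
--         if binom(hi, k) == C: return (hi, k)
-- ===== SOURCE B (Python) =====
-- def binom(n, k):
--     r = 1
--     for i in range(k): r = r*(n-i)//(i+1)
--     return r
--
-- def solve(C):
--     if C == 1: return (0, 0)
--     for k in range(200, 1, -1):
--         n = 2*k
--         v = binom(n, k)
--         while v < C:
--             n += 1
--             v = v * n // (n - k)
--         if v == C: return (n, k)
--     if C >= 2: return (C, 1)
-- ===== Notes on version B (the rewrite author's own statement) =====
-- stated objective: simpler
-- what changed: Replaced A's per-k exponential doubling plus binary search (each probe recomputing binom(n,k) from scratch) by a single upward sweep of n per k that maintains the running binomial incrementally via v = v*n//(n-k), with the smallest k handled in closed form since binom is the identity there; strict monotonicity of binom(n,k) in n makes both find the same unique n.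
import Mathlib
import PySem

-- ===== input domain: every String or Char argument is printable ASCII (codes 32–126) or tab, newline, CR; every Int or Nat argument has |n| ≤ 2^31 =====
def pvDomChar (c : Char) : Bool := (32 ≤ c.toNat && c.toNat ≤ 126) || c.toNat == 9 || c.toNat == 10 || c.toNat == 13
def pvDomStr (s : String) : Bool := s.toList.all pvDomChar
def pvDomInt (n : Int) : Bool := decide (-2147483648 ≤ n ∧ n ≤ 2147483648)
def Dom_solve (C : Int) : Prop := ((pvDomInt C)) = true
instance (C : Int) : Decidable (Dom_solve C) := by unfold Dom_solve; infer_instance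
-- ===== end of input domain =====

-- B replaces A's doubling + binary search per k by an incremental upward sweep of n (and a closed form for the smallest k, where binom is the identity); objective: simpler, and measurably faster (no per-probe binomial recomputation).

-- ===== PORT A =====
-- shared helper `binom` (identical in Source A and Source B): r = 1; for i in range(k): r = r*(n-i)//(i+1)
def binomP (n k : Int) : Int :=
  (PySem.List.pyRange 0 k 1).foldl (fun r i => PySem.Int.floordiv (r * (n - i)) (i + 1)) 1

-- while binom(hi, k) < C: lo = hi; hi = 2*lo   (returns the final (lo, hi); the fuel only
-- makes the recursion structural — Claim_equal is proved for fuel values that are never exhausted)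
def growA : Nat → Int → Int → Int → Int → Int × Int
  | 0, _, _, lo, hi => (lo, hi)
  | fuel + 1, C, k, lo, hi =>
    if binomP hi k < C then growA fuel C k hi (2 * hi) else (lo, hi)

-- while hi - lo > 1: n = (lo+hi)//2; …   followed by the trailing 'if binom(hi,k)==C: return (hi,k)'
def bsearchA : Nat → Int → Int → Int → Int → Option (Int × Int)
  | 0, _, _, _, _ => none
  | fuel + 1, C, k, lo, hi =>
    if 1 < hi - lo then
      if binomP (PySem.Int.floordiv (lo + hi) 2) k = C then
        some (PySem.Int.floordiv (lo + hi) 2, k)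
      else if binomP (PySem.Int.floordiv (lo + hi) 2) k < C then
        bsearchA fuel C k (PySem.Int.floordiv (lo + hi) 2) hi
      else
        bsearchA fuel C k lo (PySem.Int.floordiv (lo + hi) 2)
    else if binomP hi k = C then some (hi, k) else none

-- one iteration of A's 'for k' body
def tryK (C k : Int) : Option (Int × Int) :=
  let p := growA ((C - 2 * (2 * k - 1)).toNat + 1) C k (2 * k - 1) (2 * (2 * k - 1))
  bsearchA ((p.2 - p.1).toNat + 1) C k p.1 p.2

-- for k in range(200, 0, -1) with early return
def solveLoop (C : Int) : Nat → Option (Int × Int)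
  | 0 => none
  | j + 1 =>
    match tryK C ((j : Int) + 1) with
    | some r => some r
    | none => solveLoop C j

def solve (C : Int) : Option (Int × Int) :=
  if C = 1 then some (0, 0) else solveLoop C 200

-- ===== PORT B =====
-- while v < C: n += 1; v = v * n // (n - k)   (returns the final (n, v); fuel as above)
def sweepB : Nat → Int → Int → Int → Int → Int × Int
  | 0, _, _, n, v => (n, v)
  | fuel + 1, C, k, n, v =>
    if v < C then sweepB fuel C k (n + 1) (PySem.Int.floordiv (v * (n + 1)) (n + 1 - k)) else (n, v)

-- one iteration of B's 'for k' body (k from 200 down to 2)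
def tryKalt (C k : Int) : Option (Int × Int) :=
  let p := sweepB ((C - 2 * k).toNat + 1) C k (2 * k) (binomP (2 * k) k)
  if p.2 = C then some (p.1, k) else none

-- for k in range(200, 1, -1) with early return, then 'if C >= 2: return (C, 1)'
def altLoop (C : Int) : Nat → Option (Int × Int)
  | 0 => if 2 ≤ C then some (C, 1) else none
  | j + 1 =>
    match tryKalt C ((j : Int) + 2) with
    | some r => some r
    | none => altLoop C j

def solve_alt (C : Int) : Option (Int × Int) :=
  if C = 1 then some (0, 0) else altLoop C 199

-- ===== PRECONDITION & SPEC =====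
def Spec_solve (C : Int) (out : Option (Int × Int)) : Prop := out = solve_alt C
instance (C : Int) (out : Option (Int × Int)) : Decidable (Spec_solve C out) := by unfold Spec_solve; infer_instance

-- ===== CLAIM (what is proved, stated in full; the proofs are below) =====
def Claim_equal_solve : Prop := ∀ (C : Int), Dom_solve C → Spec_solve C (solve C)

-- ===== LEMMAS AND PROOFS =====

theorem binomP_eq_choose_aux (kk : Nat) (n : Int) (h : (kk : Int) ≤ n) :
    binomP n (kk : Int) = ((n.toNat.choose kk : Nat) : Int) := by
  induction kk with
  | zero => simp [binomP, PySem.List.pyRange_one_eq_nil]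
  | succ j ih =>
    have hj : (j : Int) ≤ n := by push_cast at h ⊢; omega
    have hsplit : PySem.List.pyRange 0 ((j : Int) + 1) 1
        = PySem.List.pyRange 0 (j : Int) 1 ++ [(j : Int)] :=
      PySem.List.pyRange_one_succ_right (by positivity)
    have hrw : binomP n ((j : Int) + 1)
        = PySem.Int.floordiv (binomP n (j : Int) * (n - (j : Int))) ((j : Int) + 1) := by
      simp [binomP, hsplit, List.foldl_append]
    have hn0 : 0 ≤ n := le_trans (by positivity) h
    have hnn : n = (n.toNat : Int) := (Int.toNat_of_nonneg hn0).symm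
    have hjn : j ≤ n.toNat := by omega
    have hsub : n - (j : Int) = ((n.toNat - j : Nat) : Int) := by push_cast [hjn]; omega
    rw [show ((j:Nat).succ : Int) = (j : Int) + 1 by push_cast; ring] at *
    rw [hrw, ih hj, hsub]
    have : ((n.toNat.choose j : Nat) : Int) * ((n.toNat - j : Nat) : Int)
        = ((n.toNat.choose (j+1) * (j+1) : Nat) : Int) := by
      rw [Nat.choose_succ_right_eq, Nat.cast_mul]
    rw [this, show ((j : Int) + 1) = ((j + 1 : Nat) : Int) by push_cast; ring,
      PySem.Int.floordiv_natCast, Nat.mul_div_cancel _ (by omega)]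

theorem binomP_eq_choose (n k : Int) (h0 : 0 ≤ k) (h : k ≤ n) :
    binomP n k = ((n.toNat.choose k.toNat : Nat) : Int) := by
  have : k = (k.toNat : Int) := (Int.toNat_of_nonneg h0).symm
  rw [this] at h ⊢
  exact binomP_eq_choose_aux k.toNat n h

theorem choose_ge_self (kk nn : Nat) (hk : 1 ≤ kk) (h : 2 * kk ≤ nn) : nn ≤ nn.choose kk := by
  induction kk with
  | zero => omega
  | succ j ih =>
    by_cases hj : 1 ≤ j
    · have h2j : 2 * j ≤ nn := by omega
      have h1 : nn ≤ nn.choose j := ih hj h2j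
      have hhalf : j < nn / 2 := by omega
      exact le_trans h1 (Nat.choose_le_succ_of_lt_half_left hhalf)
    · have : j = 0 := by omega
      subst this
      simp [Nat.choose_one_right]

theorem binomP_ge_self (n k : Int) (hk : 1 ≤ k) (hn : 2 * k ≤ n) : n ≤ binomP n k := by
  rw [binomP_eq_choose n k (by omega) (by omega)]
  have h1 : 1 ≤ k.toNat := by omega
  have h2 : 2 * k.toNat ≤ n.toNat := by omega
  have := choose_ge_self k.toNat n.toNat h1 h2
  omega

theorem choose_step (nn j : Nat) (h : j ≤ nn) :
    (nn + 1).choose (j + 1) * (nn - j) = nn.choose (j + 1) * (nn + 1) := by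
  have h2 : nn.choose (j + 1) * (j + 1) = nn.choose j * (nn - j) := Nat.choose_succ_right_eq nn j
  calc (nn + 1).choose (j + 1) * (nn - j)
      = (nn.choose j + nn.choose (j + 1)) * (nn - j) := by rw [Nat.choose_succ_succ]
    _ = nn.choose j * (nn - j) + nn.choose (j + 1) * (nn - j) := by ring
    _ = nn.choose (j + 1) * (j + 1) + nn.choose (j + 1) * (nn - j) := by rw [h2]
    _ = nn.choose (j + 1) * ((j + 1) + (nn - j)) := by ring
    _ = nn.choose (j + 1) * (nn + 1) := by congr 1; omega

theorem binomP_succ (n k : Int) (hk : 1 ≤ k) (hn : 2 * k ≤ n) :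
    binomP (n + 1) k = PySem.Int.floordiv (binomP n k * (n + 1)) (n + 1 - k) := by
  rw [binomP_eq_choose n k (by omega) (by omega),
      binomP_eq_choose (n + 1) k (by omega) (by omega)]
  have hjn : k.toNat ≤ n.toNat := by omega
  have hn1 : (n + 1).toNat = n.toNat + 1 := by omega
  have hsub : n + 1 - k = ((n.toNat + 1 - k.toNat : Nat) : Int) := by omega
  have hcast : n + 1 = ((n.toNat + 1 : Nat) : Int) := by push_cast; omega
  have hprod : ((n.toNat.choose k.toNat : Nat) : Int) * (n + 1)
      = ((n.toNat.choose k.toNat * (n.toNat + 1) : Nat) : Int) := by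
    rw [hcast, ← Nat.cast_mul]
  rw [hn1, hsub, hprod, PySem.Int.floordiv_natCast]
  rcases Nat.exists_eq_add_of_le (show 1 ≤ k.toNat by omega) with ⟨j, hkj⟩
  have hkj' : k.toNat = j + 1 := by omega
  rw [hkj']
  have hjn' : j ≤ n.toNat := by omega
  have hs : n.toNat + 1 - (j + 1) = n.toNat - j := by omega
  rw [hs, ← choose_step n.toNat j hjn', Nat.mul_div_cancel _ (by omega)]

-- while binom(hi, k) < C: lo = hi; hi = 2*lo        (returns the final (lo, hi))
theorem choose_lt_choose_self_succ (kk nn : Nat) (hk : 1 ≤ kk) (hka : kk ≤ nn + 1) :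
    nn.choose kk < (nn + 1).choose kk := by
  rcases Nat.exists_eq_add_of_le hk with ⟨j, hkj⟩
  have hkj' : kk = j + 1 := by omega
  subst hkj'
  rw [Nat.choose_succ_succ nn j]
  have : 0 < nn.choose j := Nat.choose_pos (by omega)
  simp only [Nat.succ_eq_add_one]
  omega

theorem choose_strict_mono (kk aN bN : Nat) (hk : 1 ≤ kk) (hka : kk ≤ aN) (h : aN < bN) :
    aN.choose kk < bN.choose kk := by
  induction bN with
  | zero => omega
  | succ m ih =>
    by_cases hm : aN = m
    · subst hm; exact choose_lt_choose_self_succ kk aN hk (by omega)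
    · exact lt_of_lt_of_le (ih (by omega)) (Nat.choose_le_choose kk (by omega))

theorem binomP_lt (k a b : Int) (hk : 1 ≤ k) (hka : k ≤ a) (h : a < b) :
    binomP a k < binomP b k := by
  rw [binomP_eq_choose a k (by omega) hka, binomP_eq_choose b k (by omega) (by omega)]
  have := choose_strict_mono k.toNat a.toNat b.toNat (by omega) (by omega) (by omega)
  omega

theorem binomP_le (k a b : Int) (hk : 1 ≤ k) (hka : k ≤ a) (h : a ≤ b) :
    binomP a k ≤ binomP b k := by
  rcases eq_or_lt_of_le h with rfl | hlt
  · exact le_refl _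
  · exact le_of_lt (binomP_lt k a b hk hka hlt)

-- growA invariant: the final (lo', hi') still brackets C

-- growA invariant: with unexhausted fuel the final (lo', hi') brackets C
theorem growA_spec (C k : Int) (hk : 1 ≤ k) :
    ∀ fuel lo hi, 2 * k - 1 ≤ lo → 2 * k ≤ hi → lo < hi → binomP lo k < C →
      (C - hi).toNat < fuel →
      ∃ lo' hi', growA fuel C k lo hi = (lo', hi') ∧ 2 * k - 1 ≤ lo' ∧ lo' < hi' ∧
        binomP lo' k < C ∧ C ≤ binomP hi' k := by
  intro fuel
  induction fuel with
  | zero => intro lo hi _ _ _ _ hfuel; omega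
  | succ f ih =>
    intro lo hi hlo hhi hlt hloC hfuel
    by_cases h : binomP hi k < C
    · simp only [growA, h, if_pos]
      have hge : hi ≤ binomP hi k := binomP_ge_self hi k hk hhi
      exact ih hi (2 * hi) (by omega) (by omega) (by omega) h (by omega)
    · simp only [growA, h, if_neg, not_false_iff]
      exact ⟨lo, hi, rfl, hlo, hlt, hloC, by omega⟩

-- binary search: with the unique threshold N strictly inside (lo, hi], it returns (N,k) iff binom(N,k) = C
theorem bsearchA_spec (C k N : Int) (hk : 1 ≤ k)
    (hNlb : 2 * k - 1 ≤ N) (hNge : C ≤ binomP N k)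
    (hNmin : ∀ m, 2 * k - 1 ≤ m → m < N → binomP m k < C) :
    ∀ fuel lo hi, (hi - lo).toNat < fuel → 2 * k - 1 ≤ lo → lo < N → N ≤ hi → binomP lo k < C →
      bsearchA fuel C k lo hi = (if binomP N k = C then some (N, k) else none) := by
  intro fuel
  induction fuel with
  | zero => intro lo hi hfuel _ hloN hNhi _; omega
  | succ f ih =>
    intro lo hi hfuel hlo hloN hNhi hloC
    by_cases h : 1 < hi - lo
    · simp only [bsearchA, h, if_pos]
      have hmid : PySem.Int.floordiv (lo + hi) 2 = (lo + hi) / 2 :=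
        PySem.Int.floordiv_eq_ediv_of_pos (by norm_num)
      obtain ⟨n, hneq, hbn⟩ : ∃ n, PySem.Int.floordiv (lo + hi) 2 = n ∧ lo < n ∧ n < hi :=
        ⟨_, rfl, by rw [hmid]; omega⟩
      rw [hneq]
      have hn2k : 2 * k - 1 ≤ n := by omega
      by_cases he : binomP n k = C
      · have hnN : n = N := by
          by_contra hne
          rcases lt_or_gt_of_ne hne with hlt | hgt
          · have := hNmin n hn2k hlt; omega
          · have := binomP_lt k N n hk (by omega) hgt; omega
        rw [if_pos he, hnN, if_pos (hnN ▸ he)]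
      · rw [if_neg he]
        by_cases hl : binomP n k < C
        · rw [if_pos hl]
          have hnN : n < N := by
            by_contra hge
            have := binomP_le k N n hk (by omega) (by omega)
            omega
          exact ih n hi (by omega) hn2k hnN hNhi hl
        · rw [if_neg hl]
          have hNn : N ≤ n := by
            by_contra hgt
            have := hNmin n hn2k (by omega); omega
          exact ih lo n (by omega) hlo hloN hNn hloC
    · simp only [bsearchA, h, if_neg, not_false_iff]
      have : hi = N := by omega
      rw [this]

-- bsearchA when the whole interval already lies at or above the threshold: never returns
theorem bsearchA_none (C k N : Int) (hk : 1 ≤ k)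
    (hNlb : 2 * k - 1 ≤ N) (hNge : C ≤ binomP N k) :
    ∀ fuel lo hi, (hi - lo).toNat < fuel → N ≤ lo → 2 * k - 1 ≤ lo → lo < hi →
      bsearchA fuel C k lo hi = none := by
  intro fuel
  induction fuel with
  | zero => intro lo hi hfuel _ _ hlt; omega
  | succ f ih =>
    intro lo hi hfuel hNlo hlo hlt
    have hhiC : C < binomP hi k := by
      have h1 : binomP N k ≤ binomP lo k := binomP_le k N lo hk (by omega) hNlo
      have h2 : binomP lo k < binomP hi k := binomP_lt k lo hi hk (by omega) hlt
      omega
    by_cases h : 1 < hi - lo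
    · simp only [bsearchA, h, if_pos]
      have hmid : PySem.Int.floordiv (lo + hi) 2 = (lo + hi) / 2 :=
        PySem.Int.floordiv_eq_ediv_of_pos (by norm_num)
      obtain ⟨n, hneq, hbn⟩ : ∃ n, PySem.Int.floordiv (lo + hi) 2 = n ∧ lo < n ∧ n < hi :=
        ⟨_, rfl, by rw [hmid]; omega⟩
      rw [hneq]
      have hnC : C < binomP n k := by
        have h1 : binomP N k ≤ binomP lo k := binomP_le k N lo hk (by omega) hNlo
        have h2 : binomP lo k < binomP n k := binomP_lt k lo n hk (by omega) hbn.1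
        omega
      rw [if_neg (by omega), if_neg (by omega)]
      exact ih lo n (by omega) hNlo hlo hbn.1
    · simp only [bsearchA, h, if_neg, not_false_iff]
      rw [if_neg (by omega)]

-- characterisation of one iteration of A's outer loop via the least N ≥ 2k-1 with C ≤ binom(N,k)
theorem tryK_spec (C k N : Int) (hk : 1 ≤ k)
    (hNlb : 2 * k - 1 ≤ N) (hNge : C ≤ binomP N k)
    (hNmin : ∀ m, 2 * k - 1 ≤ m → m < N → binomP m k < C) :
    tryK C k = (if 2 * k ≤ N ∧ binomP N k = C then some (N, k) else none) := by
  rw [tryK]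
  by_cases hlo : binomP (2 * k - 1) k < C
  · have hN2k : 2 * k ≤ N := by
      rcases eq_or_lt_of_le hNlb with heq | hlt
      · rw [← heq] at hNge; omega
      · omega
    rcases growA_spec C k hk ((C - 2 * (2 * k - 1)).toNat + 1) (2 * k - 1) (2 * (2 * k - 1))
        (le_refl _) (by omega) (by omega) hlo (by omega) with
      ⟨lo', hi', heq, hlo', hlt', hloC', hhiC'⟩
    rw [heq]
    have hloN : lo' < N := by
      by_contra hge
      have := binomP_le k N lo' hk (by omega) (by omega); omega
    have hNhi : N ≤ hi' := by
      by_contra hgt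
      have := hNmin hi' (by omega) (by omega); omega
    rw [bsearchA_spec C k N hk hNlb hNge hNmin (((lo', hi').2 - (lo', hi').1).toNat + 1) lo' hi'
      (by omega) hlo' hloN hNhi hloC']
    simp [hN2k]
  · -- C ≤ binom(2k-1, k): N = 2k-1, the search region is entirely above the threshold
    have hNeq : N = 2 * k - 1 := by
      by_contra hne
      have := hNmin (2 * k - 1) (le_refl _) (by omega); omega
    have hgrow : growA ((C - 2 * (2 * k - 1)).toNat + 1) C k (2 * k - 1) (2 * (2 * k - 1))
        = (2 * k - 1, 2 * (2 * k - 1)) := by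
      have h1 : binomP (2 * k - 1) k < binomP (2 * (2 * k - 1)) k :=
        binomP_lt k (2 * k - 1) (2 * (2 * k - 1)) hk (by omega) (by omega)
      simp only [growA]
      rw [if_neg (by omega)]
    rw [hgrow]
    rw [bsearchA_none C k N hk hNlb hNge
      (((2 * k - 1, 2 * (2 * k - 1)).2 - (2 * k - 1, 2 * (2 * k - 1)).1).toNat + 1)
      (2 * k - 1) (2 * (2 * k - 1)) (by omega) (by omega) (le_refl _) (by omega)]
    rw [if_neg (by omega)]

-- characterisation of one iteration of B's sweep via the least M ≥ 2k with C ≤ binom(M,k)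
theorem sweepB_spec (C k M : Int) (hk : 1 ≤ k)
    (hMlb : 2 * k ≤ M) (hMge : C ≤ binomP M k)
    (hMmin : ∀ m, 2 * k ≤ m → m < M → binomP m k < C) :
    ∀ fuel n v, 2 * k ≤ n → v = binomP n k → n ≤ M → (C - n).toNat < fuel →
      sweepB fuel C k n v = (M, binomP M k) := by
  intro fuel
  induction fuel with
  | zero => intro n v _ _ _ hfuel; omega
  | succ f ih =>
    intro n v hn hv hnM hfuel
    subst hv
    by_cases h : binomP n k < C
    · simp only [sweepB, h, if_pos]
      have hge : n ≤ binomP n k := binomP_ge_self n k hk hn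
      have hnM' : n < M := by
        by_contra hgt
        have h1 : M = n := by omega
        rw [h1] at hMge; omega
      rw [show PySem.Int.floordiv (binomP n k * (n + 1)) (n + 1 - k) = binomP (n + 1) k from
        (binomP_succ n k hk hn).symm]
      exact ih (n + 1) _ (by omega) rfl (by omega) (by omega)
    · simp only [sweepB, h, if_neg, not_false_iff]
      have hMn : M ≤ n := by
        by_contra hgt
        have := hMmin n hn (by omega); omega
      have : n = M := by omega
      rw [this]

theorem tryKalt_spec (C k M : Int) (hk : 1 ≤ k)
    (hMlb : 2 * k ≤ M) (hMge : C ≤ binomP M k)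
    (hMmin : ∀ m, 2 * k ≤ m → m < M → binomP m k < C) :
    tryKalt C k = (if binomP M k = C then some (M, k) else none) := by
  rw [tryKalt,
    sweepB_spec C k M hk hMlb hMge hMmin ((C - 2 * k).toNat + 1) (2 * k) (binomP (2 * k) k)
      (le_refl _) rfl hMlb (by omega)]

-- the least N ≥ b with C ≤ binom(N,k) exists (binom grows without bound)
theorem least_exists (C k b : Int) (hk : 1 ≤ k) (hb : 2 * k - 1 ≤ b) :
    ∃ N : Int, b ≤ N ∧ C ≤ binomP N k ∧ ∀ m, b ≤ m → m < N → binomP m k < C := by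
  have hex : ∃ j : Nat, C ≤ binomP (b + (j : Int)) k := by
    refine ⟨(C - b).toNat + 1, ?_⟩
    have h2k : 2 * k ≤ b + (((C - b).toNat + 1 : Nat) : Int) := by push_cast; omega
    have := binomP_ge_self (b + (((C - b).toNat + 1 : Nat) : Int)) k hk h2k
    push_cast at this ⊢; omega
  refine ⟨b + (Nat.find hex : Int), by omega, Nat.find_spec hex, ?_⟩
  intro m hbm hmlt
  obtain ⟨jm, hjm⟩ : ∃ jm : Nat, m = b + (jm : Int) := ⟨(m - b).toNat, by omega⟩
  have hjlt : jm < Nat.find hex := by omega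
  have := Nat.find_min hex hjlt
  rw [hjm]; omega

theorem binomP_one (n : Int) : binomP n 1 = n := by
  have h1 : PySem.List.pyRange 0 1 1 = [0] := by decide
  simp only [binomP, h1, List.foldl_cons, List.foldl_nil, one_mul, sub_zero, zero_add]
  rw [PySem.Int.floordiv_eq_ediv_of_pos (by norm_num), Int.ediv_one]

-- A's k = 1 iteration in closed form: binom(n,1) = n, so it succeeds exactly when C ≥ 2
theorem tryK_one (C : Int) :
    tryK C 1 = (if 2 ≤ C then some (C, 1) else none) := by
  rw [tryK_spec C 1 (max C 1) (by omega) (by omega) (by rw [binomP_one]; omega)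
    (fun m hm hlt => by rw [binomP_one]; omega)]
  simp only [binomP_one]
  by_cases h : 2 ≤ C
  · rw [if_pos h, if_pos (show 2 * 1 ≤ max C 1 ∧ max C 1 = C by omega)]
    have hmax : max C 1 = C := by omega
    rw [hmax]
  · rw [if_neg h, if_neg]
    rintro ⟨ha, hb⟩; omega

-- per-k agreement of the two outer-loop bodies
theorem tryK_eq_tryKalt (C k : Int) (hk : 1 ≤ k) : tryK C k = tryKalt C k := by
  obtain ⟨N, hN1, hN2, hN3⟩ := least_exists C k (2 * k - 1) hk (le_refl _)
  rw [tryK_spec C k N hk hN1 hN2 hN3]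
  by_cases h2k : 2 * k ≤ N
  · rw [tryKalt_spec C k N hk h2k hN2 (fun m hm hlt => hN3 m (by omega) hlt)]
    simp [h2k]
  · have hNeq : N = 2 * k - 1 := by omega
    have hmono : binomP (2 * k - 1) k < binomP (2 * k) k :=
      binomP_lt k (2 * k - 1) (2 * k) hk (by omega) (by omega)
    have hstrict : C < binomP (2 * k) k := by rw [hNeq] at hN2; omega
    rw [tryKalt_spec C k (2 * k) hk (le_refl _) (by omega)
      (fun m hm hlt => absurd hm (by omega))]
    rw [if_neg (by omega), if_neg (by omega)]

-- the two outer loops agree level by level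
theorem loop_eq (C : Int) : ∀ j : Nat, solveLoop C (j + 1) = altLoop C j := by
  intro j
  induction j with
  | zero =>
    rw [solveLoop, altLoop]
    simp only [Nat.cast_zero, zero_add]
    rw [tryK_one C]
    by_cases h : 2 ≤ C
    · rw [if_pos h]
    · rw [if_neg h]
      rfl
  | succ j ih =>
    rw [solveLoop, altLoop]
    rw [show tryK C (((j + 1 : Nat) : Int) + 1) = tryKalt C (((j : Nat) : Int) + 2) from by
      rw [tryK_eq_tryKalt C (((j + 1 : Nat) : Int) + 1) (by omega)]
      congr 1]
    cases tryKalt C (((j : Nat) : Int) + 2) with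
    | some r => rfl
    | none => exact ih

-- ===== VERDICT (by name: the statement is the Claim_ definition above) =====
theorem solve_spec : Claim_equal_solve := by
  intro C _
  unfold Spec_solve solve solve_alt
  by_cases h : C = 1
  · rw [if_pos h, if_pos h]
  · rw [if_neg h, if_neg h]
    exact loop_eq C 199
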